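-- pv_equiv track=rewrite | github.com/AdamZhouSE/pythonHomework | Code/CodeRecords/2094/60604/237989.py | exc
-- ===== SOURCE A (Python) =====
-- def exc(a):
--     if a.isdigit():
--         return True
--     else:
--         dot=False
--         E=False
--         begin=False
--         for i in range(len(a)):
--             if i!=0 and a[i]=='-':
--                 return False
--             elif a[i]=='e' and E:
--                 return False
--             elif a[i]=='e' and not E:
--                 E=True
--             elif a[i]=='.' and(dot==True or E):
--                 return False
--             elif a[i]=='.':
--                 dot=True
--     return True
-- ===== SOURCE B (Python) =====
-- def exc(a):
--     if a.isdigit():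
--         return True
--     if '-' in a[1:]:
--         return False
--     e = a.find('e')
--     if e != -1 and ('e' in a[e + 1:] or '.' in a[e + 1:]):
--         return False
--     d = a.find('.')
--     if d != -1 and '.' in a[d + 1:]:
--         return False
--     return True
-- ===== Notes on version B (the rewrite author's own statement) =====
-- stated objective: simpler
-- what changed: Replaced the single index loop with its dot/E flag state machine by four targeted whole-string tests ('-' in the tail, a second 'e' after the first, a '.' after the first 'e', a second '.' after the first) using slicing, find and membership.
import Mathlib
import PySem

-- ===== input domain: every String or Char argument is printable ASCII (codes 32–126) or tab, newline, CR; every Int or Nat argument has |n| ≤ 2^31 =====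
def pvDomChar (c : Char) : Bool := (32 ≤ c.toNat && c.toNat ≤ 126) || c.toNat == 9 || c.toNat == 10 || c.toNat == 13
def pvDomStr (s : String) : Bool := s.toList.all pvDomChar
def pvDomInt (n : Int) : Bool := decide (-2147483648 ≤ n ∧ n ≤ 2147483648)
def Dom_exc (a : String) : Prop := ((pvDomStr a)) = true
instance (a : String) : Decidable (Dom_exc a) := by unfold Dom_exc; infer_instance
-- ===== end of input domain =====

-- B replaces A's flag-tracking index loop by four targeted whole-string tests (slice membership / find); same O(n), plainer, and measurably faster in CPython (C-level scans vs a per-char loop).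

-- ===== PORT A =====
-- the 'for i in range(len(a))' loop with early returns and the dot/E flags ('begin' is unused in A)
def excLoopA : List (Int × Char) → Bool → Bool → Bool
  | [], _, _ => true
  | (i, c) :: rest, dot, E =>
    if i ≠ 0 ∧ c = '-' then false
    else if c = 'e' ∧ E = true then false
    else if c = 'e' ∧ ¬(E = true) then excLoopA rest dot true
    else if c = '.' ∧ (dot = true ∨ E = true) then false
    else if c = '.' then excLoopA rest true E
    else excLoopA rest dot E

def exc (a : String) : Bool :=
  if PySem.Str.strIsdigit a then true
  else excLoopA (PySem.List.enumerate a.toList) false false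

-- ===== PORT B =====
def exc_alt (a : String) : Bool :=
  if PySem.Str.strIsdigit a then true
  else if PySem.Str.isIn "-" (PySem.Str.slice a (some 1) none) then false
  else
    let e := PySem.Str.find a "e"
    if e ≠ -1 ∧ (PySem.Str.isIn "e" (PySem.Str.slice a (some (e + 1)) none) = true
                 ∨ PySem.Str.isIn "." (PySem.Str.slice a (some (e + 1)) none) = true) then false
    else
      let d := PySem.Str.find a "."
      if d ≠ -1 ∧ PySem.Str.isIn "." (PySem.Str.slice a (some (d + 1)) none) = true then false
      else true

-- ===== PRECONDITION & SPEC =====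
def Spec_exc (a : String) (out : Bool) : Prop := out = exc_alt a
instance (a : String) (out : Bool) : Decidable (Spec_exc a out) := by unfold Spec_exc; infer_instance

-- ===== CLAIM (what is proved, stated in full; the proofs are below) =====
def Claim_equal_exc : Prop := ∀ (a : String), Dom_exc a → Spec_exc a (exc a)

-- ===== LEMMAS AND PROOFS =====

-- A's loop on the character list once past index 0 (where every '-' is fatal)
def chk : List Char → Bool → Bool → Bool
  | [], _, _ => true
  | c :: r, dot, E =>
    if c = '-' then false
    else if c = 'e' then (if E then false else chk r dot true)
    else if c = '.' then (if dot || E then false else chk r true E)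
    else chk r dot E

-- the common normal form both programs are reduced to
def NF (l : List Char) : Prop :=
  '-' ∉ l.drop 1 ∧
  ('e' ∈ l → ('e' ∉ l.drop (l.idxOf 'e' + 1) ∧ '.' ∉ l.drop (l.idxOf 'e' + 1))) ∧
  l.count '.' ≤ 1

lemma prefix_singleton_iff (c : Char) (t : List Char) : [c] <+: t ↔ t.head? = some c := by
  constructor
  · rintro ⟨s, rfl⟩; rfl
  · intro h
    cases t with
    | nil => simp at h
    | cons x xs => simp at h; subst h; exact ⟨xs, rfl⟩

lemma find_singleton_of_mem (l : List Char) (c : Char) (h : c ∈ l) :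
    PySem.Chars.find l [c] = (l.idxOf c : Int) := by
  have h0 : 0 ≤ PySem.Chars.find l [c] :=
    (PySem.Chars.find_nonneg_iff l [c]).2 ((List.singleton_infix_iff c l).2 h)
  obtain ⟨hpre, hmin⟩ := PySem.Chars.find_spec h0
  set n := (PySem.Chars.find l [c]).toNat with hn
  have hlen : n < l.length := by
    by_contra hge
    push_neg at hge
    rw [List.drop_eq_nil_of_le hge] at hpre
    simp [prefix_singleton_iff] at hpre
  have hget : l[n] = c := by
    have := (prefix_singleton_iff c _).1 hpre
    rw [List.head?_drop] at this
    simpa [List.getElem?_eq_getElem hlen] using this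
  have hidx := List.idxOf_lt_length_of_mem h
  have h1 : l.idxOf c < n + 1 := by
    rw [← List.mem_take_iff_idxOf_lt h]
    have hnt : n < (l.take (n+1)).length := by simp; omega
    have : (l.take (n+1))[n] = c := by simpa [List.getElem_take] using hget
    exact this ▸ List.getElem_mem hnt
  have h2 : n ≤ l.idxOf c := by
    by_contra hgt
    push_neg at hgt
    exact hmin _ hgt ((prefix_singleton_iff c _).2
      (by rw [List.head?_drop]; simp [List.getElem?_eq_getElem hidx, List.getElem_idxOf]))
  have : n = l.idxOf c := by omega
  rw [← Int.toNat_of_nonneg h0, ← hn, this]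

lemma find_singleton_of_notMem (l : List Char) (c : Char) (h : c ∉ l) :
    PySem.Chars.find l [c] = -1 :=
  (PySem.Chars.find_eq_neg_one_iff l [c]).2 (by simpa [List.singleton_infix_iff] using h)

lemma split_idxOf (l : List Char) (c : Char) (h : c ∈ l) :
    l = l.take (l.idxOf c) ++ c :: l.drop (l.idxOf c + 1) := by
  have hlt := List.idxOf_lt_length_of_mem h
  conv_lhs => rw [← List.take_append_drop (l.idxOf c) l]
  rw [List.drop_eq_getElem_cons hlt, List.getElem_idxOf hlt]

lemma not_mem_take_idxOf (l : List Char) (c : Char) : c ∉ l.take (l.idxOf c) := by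
  by_cases h : c ∈ l
  · rw [List.mem_take_iff_idxOf_lt h]; omega
  · exact fun hc => h (List.take_subset _ _ hc)

lemma count_split_e (r : List Char) (h : 'e' ∈ r) :
    r.count '.' = (r.take (r.idxOf 'e')).count '.' + (r.drop (r.idxOf 'e' + 1)).count '.' := by
  conv_lhs => rw [split_idxOf r 'e' h]
  simp [List.count_append, List.count_cons]

lemma enumA (l : List Char) : ∀ (k : Int), 1 ≤ k → ∀ (dot E : Bool),
    excLoopA (PySem.List.enumerate l k) dot E = chk l dot E := by
  induction l with
  | nil => intro k hk dot E; simp [PySem.List.enumerate, excLoopA, chk]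
  | cons c r ih =>
    intro k hk dot E
    have he : PySem.List.enumerate (c :: r) k = (k, c) :: PySem.List.enumerate r (k+1) := by
      simp [PySem.List.enumerate]
    rw [he]
    have hk0 : k ≠ 0 := by omega
    have ih' := ih (k+1) (by omega)
    by_cases h1 : c = '-' <;> by_cases h2 : c = 'e' <;> by_cases h3 : c = '.' <;>
      cases E <;> cases dot <;> simp_all [excLoopA, chk]

lemma chk_iff (l : List Char) : ∀ (dot E : Bool),
    chk l dot E = true ↔
      ('-' ∉ l ∧
        if E = true then 'e' ∉ l ∧ '.' ∉ l
        else if 'e' ∈ l then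
          'e' ∉ l.drop (l.idxOf 'e' + 1) ∧ '.' ∉ l.drop (l.idxOf 'e' + 1) ∧
          (l.take (l.idxOf 'e')).count '.' + (if dot = true then 1 else 0) ≤ 1
        else l.count '.' + (if dot = true then 1 else 0) ≤ 1) := by
  induction l with
  | nil => intro dot E; cases E <;> cases dot <;> simp [chk]
  | cons c r ih =>
    intro dot E
    by_cases h1 : c = '-'
    · subst h1; simp [chk]
    · by_cases h2 : c = 'e'
      · subst h2
        cases E
        · have hL : chk ('e'::r) dot false = chk r dot true := by simp [chk]
          rw [hL, ih dot true]
          cases dot <;> simp [List.idxOf_cons] <;> tauto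
        · simp [chk]
      · by_cases h3 : c = '.'
        · subst h3
          cases E
          · cases dot
            · have hL : chk ('.'::r) false false = chk r true false := by simp [chk]
              rw [hL, ih true false]
              by_cases h4 : 'e' ∈ r <;>
                simp [List.idxOf_cons, h4, List.count_cons, List.drop_succ_cons] <;> tauto
            · have hL : chk ('.'::r) true false = false := by simp [chk]
              rw [hL]
              by_cases h4 : 'e' ∈ r <;>
                simp [List.idxOf_cons, h4, List.count_cons] <;> intros <;> omega
          · have hL : chk ('.'::r) dot true = false := by simp [chk]
            rw [hL]; simp
        · have hL : chk (c::r) dot E = chk r dot E := by simp [chk, h1, h2, h3]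
          have h1' : ¬('-' = c) := fun h => h1 h.symm
          have h2' : ¬('e' = c) := fun h => h2 h.symm
          have h3' : ¬('.' = c) := fun h => h3 h.symm
          rw [hL, ih dot E]
          cases E
          · by_cases h4 : 'e' ∈ r <;>
              simp [List.idxOf_cons, h1, h2, h3, h1', h2', h3', h4, List.count_cons,
                List.drop_succ_cons] <;> tauto
          · simp [h1, h2, h3, h1', h2', h3']

lemma A_iff (l : List Char) :
    excLoopA (PySem.List.enumerate l) false false = true ↔ NF l := by
  cases l with
  | nil => simp [PySem.List.enumerate, excLoopA, NF]
  | cons c r =>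
    have he : PySem.List.enumerate (c :: r) = (0, c) :: PySem.List.enumerate r 1 := by
      simp [PySem.List.enumerate]
    rw [he]
    by_cases h2 : c = 'e'
    · subst h2
      have hL : excLoopA ((0,'e') :: PySem.List.enumerate r 1) false false = chk r false true := by
        simp [excLoopA, enumA r 1 (by norm_num)]
      rw [hL, chk_iff]
      simp only [if_true, NF, List.idxOf_cons, List.drop_succ_cons, List.count_cons]
      simp
      intro _ _ hc
      simp [List.count_eq_zero_of_not_mem hc]
    · by_cases h3 : c = '.'
      · subst h3
        have hL : excLoopA ((0,'.') :: PySem.List.enumerate r 1) false false = chk r true false := by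
          simp [excLoopA, enumA r 1 (by norm_num)]
        rw [hL, chk_iff]
        have h2' : ¬('e' = '.') := by decide
        by_cases h4 : 'e' ∈ r
        · have hsp := count_split_e r h4
          simp only [NF, List.idxOf_cons, List.drop_succ_cons, List.count_cons,
            List.mem_cons, h4, if_pos, or_true, if_true]
          simp [h2', h4]
          intro _
          constructor
          · rintro ⟨hb, hc, hd⟩
            have := List.count_eq_zero_of_not_mem hc
            exact ⟨⟨hb, hc⟩, by omega⟩
          · rintro ⟨⟨hb, hc⟩, hd⟩
            have := List.count_eq_zero_of_not_mem hc
            exact ⟨hb, hc, by omega⟩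
        · simp [NF, List.idxOf_cons, h2', h4, List.count_cons, chk_iff]
      · have hL : excLoopA ((0,c) :: PySem.List.enumerate r 1) false false = chk r false false := by
          simp [excLoopA, h2, h3, enumA r 1 (by norm_num)]
        rw [hL, chk_iff]
        have h2' : ¬('e' = c) := fun h => h2 h.symm
        have h3' : ¬('.' = c) := fun h => h3 h.symm
        by_cases h4 : 'e' ∈ r
        · have hsp := count_split_e r h4
          simp [NF, List.idxOf_cons, h2, h3, h2', h3', h4, List.count_cons, List.drop_succ_cons]
          intro _
          constructor
          · rintro ⟨hb, hc, hd⟩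
            have := List.count_eq_zero_of_not_mem hc
            exact ⟨⟨hb, hc⟩, by omega⟩
          · rintro ⟨⟨hb, hc⟩, hd⟩
            have := List.count_eq_zero_of_not_mem hc
            exact ⟨hb, hc, by omega⟩
        · simp [NF, List.idxOf_cons, h2, h3, h2', h3', h4, List.count_cons]

lemma isInMinus_iff (a : String) :
    (PySem.Str.isIn "-" (PySem.Str.slice a (some 1) none) = true) ↔ '-' ∈ a.toList.drop 1 := by
  rw [PySem.Str.isIn_eq, PySem.Str.toList_slice, PySem.Chars.slice_eq_listSlice,
    PySem.List.slice_from a.toList (show (0:Int) ≤ 1 by norm_num)]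
  rw [show "-".toList = ['-'] from by decide]
  rw [PySem.Chars.isIn_iff_infix, List.singleton_infix_iff]
  norm_num

lemma isIn_drop_iff (a : String) (c : Char) (s : String) (hs : s.toList = [c]) (n : Nat) :
    (PySem.Str.isIn s (PySem.Str.slice a (some ((n:Int) + 1)) none) = true) ↔
      c ∈ a.toList.drop (n+1) := by
  rw [PySem.Str.isIn_eq, PySem.Str.toList_slice, PySem.Chars.slice_eq_listSlice,
    PySem.List.slice_from a.toList (show (0:Int) ≤ (n:Int)+1 by positivity), hs,
    PySem.Chars.isIn_iff_infix, List.singleton_infix_iff]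
  norm_num

lemma B_iff (a : String) :
    ((if PySem.Str.isIn "-" (PySem.Str.slice a (some 1) none) then false
      else if PySem.Str.find a "e" ≠ -1 ∧
          (PySem.Str.isIn "e" (PySem.Str.slice a (some (PySem.Str.find a "e" + 1)) none) = true
           ∨ PySem.Str.isIn "." (PySem.Str.slice a (some (PySem.Str.find a "e" + 1)) none) = true)
        then false
      else if PySem.Str.find a "." ≠ -1 ∧
          PySem.Str.isIn "." (PySem.Str.slice a (some (PySem.Str.find a "." + 1)) none) = true
        then false
      else true) = true) ↔ NF a.toList := by
  have hfe : PySem.Str.find a "e" = PySem.Chars.find a.toList ['e'] := by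
    rw [PySem.Str.find_eq, show "e".toList = ['e'] from by decide]
  have hfd : PySem.Str.find a "." = PySem.Chars.find a.toList ['.'] := by
    rw [PySem.Str.find_eq, show ".".toList = ['.'] from by decide]
  by_cases hm : '-' ∈ a.toList.drop 1
  · rw [if_pos ((isInMinus_iff a).2 hm)]
    simp only [Bool.false_eq_true, false_iff, NF]
    rintro ⟨h, -, -⟩
    exact h hm
  · rw [if_neg (fun h => hm ((isInMinus_iff a).1 h))]
    by_cases he : 'e' ∈ a.toList
    · rw [hfe, find_singleton_of_mem _ _ he]
      have hne : ((a.toList.idxOf 'e' : Int) ≠ -1) := by omega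
      simp only [isIn_drop_iff a 'e' "e" (by decide), isIn_drop_iff a '.' "." (by decide)]
      by_cases hafter : 'e' ∈ a.toList.drop (a.toList.idxOf 'e' + 1) ∨
          '.' ∈ a.toList.drop (a.toList.idxOf 'e' + 1)
      · rw [if_pos ⟨hne, hafter⟩]
        simp only [Bool.false_eq_true, false_iff, NF]
        rintro ⟨-, hcl, -⟩
        exact (by tauto : ¬ _ ) (hcl he)
      · rw [if_neg (by tauto)]
        push_neg at hafter
        by_cases hdot : '.' ∈ a.toList
        · rw [hfd, find_singleton_of_mem _ _ hdot]
          simp only [isIn_drop_iff a '.' "." (by decide)]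
          have hnd : ((a.toList.idxOf '.' : Int) ≠ -1) := by omega
          have hsp : a.toList.count '.' =
              1 + (a.toList.drop (a.toList.idxOf '.' + 1)).count '.' := by
            conv_lhs => rw [split_idxOf a.toList '.' hdot]
            simp [List.count_append, List.count_cons,
              List.count_eq_zero_of_not_mem (not_mem_take_idxOf a.toList '.')]
            try omega
          by_cases h2d : '.' ∈ a.toList.drop (a.toList.idxOf '.' + 1)
          · rw [if_pos ⟨hnd, h2d⟩]
            have : 1 ≤ (a.toList.drop (a.toList.idxOf '.' + 1)).count '.' :=
              List.one_le_count_iff.2 h2d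
            simp only [Bool.false_eq_true, false_iff, NF]
            rintro ⟨-, -, hcnt⟩
            omega
          · rw [if_neg (by tauto)]
            have : (a.toList.drop (a.toList.idxOf '.' + 1)).count '.' = 0 :=
              List.count_eq_zero_of_not_mem h2d
            refine ⟨fun _ => ⟨hm, fun _ => ⟨hafter.1, hafter.2⟩, by omega⟩, fun _ => rfl⟩
        · rw [hfd, find_singleton_of_notMem _ _ hdot]
          rw [if_neg (by simp)]
          exact ⟨fun _ => ⟨hm, fun _ => ⟨hafter.1, hafter.2⟩, by
            simp [List.count_eq_zero_of_not_mem hdot]⟩, fun _ => rfl⟩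
    · rw [hfe, find_singleton_of_notMem _ _ he]
      rw [if_neg (by simp)]
      by_cases hdot : '.' ∈ a.toList
      · rw [hfd, find_singleton_of_mem _ _ hdot]
        simp only [isIn_drop_iff a '.' "." (by decide)]
        have hnd : ((a.toList.idxOf '.' : Int) ≠ -1) := by omega
        have hsp : a.toList.count '.' =
            1 + (a.toList.drop (a.toList.idxOf '.' + 1)).count '.' := by
          conv_lhs => rw [split_idxOf a.toList '.' hdot]
          simp [List.count_append, List.count_cons,
            List.count_eq_zero_of_not_mem (not_mem_take_idxOf a.toList '.')]
          try omega
        by_cases h2d : '.' ∈ a.toList.drop (a.toList.idxOf '.' + 1)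
        · rw [if_pos ⟨hnd, h2d⟩]
          have : 1 ≤ (a.toList.drop (a.toList.idxOf '.' + 1)).count '.' :=
            List.one_le_count_iff.2 h2d
          simp only [Bool.false_eq_true, false_iff, NF]
          rintro ⟨-, -, hcnt⟩
          omega
        · rw [if_neg (by tauto)]
          have : (a.toList.drop (a.toList.idxOf '.' + 1)).count '.' = 0 :=
            List.count_eq_zero_of_not_mem h2d
          exact ⟨fun _ => ⟨hm, fun h => absurd h he, by omega⟩, fun _ => rfl⟩
      · rw [hfd, find_singleton_of_notMem _ _ hdot]
        rw [if_neg (by simp)]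
        exact ⟨fun _ => ⟨hm, fun h => absurd h he,
          by simp [List.count_eq_zero_of_not_mem hdot]⟩, fun _ => rfl⟩

-- ===== VERDICT (by name: the statement is the Claim_ definition above) =====
theorem exc_spec : Claim_equal_exc := by
  intro a _
  unfold Spec_exc exc exc_alt
  cases hd : PySem.Str.strIsdigit a
  · simp only [hd, Bool.false_eq_true, if_false]
    rw [Bool.eq_iff_iff, A_iff]
    exact (B_iff a).symm
  · simp only [hd, if_true]
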